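-- pv_equiv track=rewrite | github.com/SuhanaSulthana/Music_GenreMaster | genre_master.py | get_majority_class
-- ===== SOURCE A (Python) =====
-- import operator
--
-- def get_majority_class(neighbors):
--     class_vote = {}
--     for neighbor in neighbors:
--         if neighbor in class_vote:
--             class_vote[neighbor] += 1
--         else:
--             class_vote[neighbor] = 1
--     sorted_votes = sorted(class_vote.items(), key=operator.itemgetter(1), reverse=True)
--     return sorted_votes[0][0]
-- ===== SOURCE B (Python) =====
-- def get_majority_class(neighbors):
--     best = neighbors[0]
--     best_count = neighbors.count(best)
--     for n in neighbors:
--         c = neighbors.count(n)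
--         if c > best_count:
--             best = n
--             best_count = c
--     return best
-- ===== Notes on version B (the rewrite author's own statement) =====
-- stated objective: simpler
-- what changed: Replaced the count-dict plus full reverse sort of the items by a direct in-order scan that keeps the leftmost element whose neighbors.count is strictly maximal; no dict and no sort.
import Mathlib
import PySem

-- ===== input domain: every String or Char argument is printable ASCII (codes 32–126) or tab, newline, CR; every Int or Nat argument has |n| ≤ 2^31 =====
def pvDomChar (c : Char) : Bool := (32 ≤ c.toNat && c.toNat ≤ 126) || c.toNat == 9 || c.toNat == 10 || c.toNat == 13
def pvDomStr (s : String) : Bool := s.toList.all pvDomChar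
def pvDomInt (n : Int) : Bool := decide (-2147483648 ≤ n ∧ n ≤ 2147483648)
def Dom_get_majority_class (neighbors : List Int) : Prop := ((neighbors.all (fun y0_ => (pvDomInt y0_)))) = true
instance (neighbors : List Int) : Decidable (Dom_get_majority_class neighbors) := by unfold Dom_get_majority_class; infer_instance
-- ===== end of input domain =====

-- B drops A's count dict and reverse sort for a plain leftmost-argmax scan using list.count; same return value on every non-empty list.

-- ===== PORT A =====
def get_majority_class (neighbors : List Int) : Int :=
  let class_vote := neighbors.foldl
    (fun d neighbor =>
      if d.contains neighbor then d.insert neighbor (d.getD neighbor 0 + 1)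
      else d.insert neighbor 1)
    (PySem.Dict.empty : PySem.Dict Int Int)
  let sorted_votes := PySem.List.sorted class_vote.items (fun p => p.2) true
  ((PySem.List.pyGet? sorted_votes 0).getD (0, 0)).1   -- sorted_votes[0] raises IndexError on []; excluded by Pre_

-- ===== PORT B =====
def get_majority_class_alt (neighbors : List Int) : Int :=
  match neighbors with
  | [] => 0   -- neighbors[0] raises IndexError here; excluded by Pre_
  | n0 :: _ =>
    (neighbors.foldl
      (fun best n =>
        let c : Int := (neighbors.count n : Int)
        if best.2 < c then (n, c) else best)
      (n0, (neighbors.count n0 : Int))).1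

-- ===== PRECONDITION & SPEC =====
-- Pre_ excludes only the empty list, on which both A and B raise IndexError.
def Pre_get_majority_class (neighbors : List Int) : Prop := neighbors ≠ []
instance (neighbors : List Int) : Decidable (Pre_get_majority_class neighbors) := by unfold Pre_get_majority_class; infer_instance
def pvWitness_get_majority_class : List Int := [1, 2, 2]

def Spec_get_majority_class (neighbors : List Int) (out : Int) : Prop := out = get_majority_class_alt neighbors
instance (neighbors : List Int) (out : Int) : Decidable (Spec_get_majority_class neighbors out) := by unfold Spec_get_majority_class; infer_instance

-- ===== CLAIM (what is proved, stated in full; the proofs are below) =====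
def Claim_equal_get_majority_class : Prop := ∀ (neighbors : List Int), Dom_get_majority_class neighbors → Pre_get_majority_class neighbors → Spec_get_majority_class neighbors (get_majority_class neighbors)

-- ===== LEMMAS AND PROOFS =====

def amaxStep {α : Type} (f : α → Int) (m x : α) : α := if f m < f x then x else m

theorem b_fold_proj (xs : List Int) : ∀ (l : List Int) (b : Int),
    (l.foldl (fun best n =>
        let c : Int := (xs.count n : Int)
        if best.2 < c then (n, c) else best) (b, (xs.count b : Int))).1
      = l.foldl (amaxStep (fun n => (xs.count n : Int))) b := by
  intro l
  induction l with
  | nil => intro b; rfl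
  | cons x t ih =>
    intro b
    simp only [List.foldl_cons, amaxStep]
    by_cases h : ((xs.count b : Int) < (xs.count x : Int))
    · simp only [h]
      exact ih x
    · simp only [h]
      exact ih b

theorem max?_some_foldl {α : Type} (f : α → Int) : ∀ (t : List α) (m : α),
    t.foldl (fun acc x =>
      match acc with
      | none => some x
      | some m => if f m < f x then some x else some m) (some m)
    = some (t.foldl (amaxStep f) m) := by
  intro t
  induction t with
  | nil => intro m; rfl
  | cons x t ih =>
    intro m
    simp only [List.foldl_cons, amaxStep]
    by_cases h : f m < f x
    · simp [h, ih]
    · simp [h, ih]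

theorem max?_cons {α : Type} (f : α → Int) (x : α) (t : List α) :
    PySem.List.max? (x :: t) f = some (t.foldl (amaxStep f) x) := by
  simp only [PySem.List.max?, List.foldl_cons]
  exact max?_some_foldl f t x


theorem head_insertBy {α : Type} (before : α → α → Bool) (x : α) (acc : List α) :
    (PySem.List.insertBy before x acc).head? =
      match acc.head? with
      | none => some x
      | some y => if before x y then some x else some y := by
  cases acc with
  | nil => simp [PySem.List.insertBy]
  | cons y ys =>
    simp only [PySem.List.insertBy, List.head?_cons]
    split <;> simp_all

theorem head_foldl_insertBy {α : Type} (key : α → Int) :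
    ∀ (l : List α) (acc : List α),
    (l.foldl (fun a x => PySem.List.insertBy (fun a b => decide (key b < key a)) x a) acc).head?
      = l.foldl (fun o x =>
          match o with
          | none => some x
          | some m => if key m < key x then some x else some m) acc.head? := by
  intro l
  induction l with
  | nil => intro acc; rfl
  | cons x t ih =>
    intro acc
    simp only [List.foldl_cons]
    rw [ih, head_insertBy]
    cases acc.head? with
    | none => rfl
    | some y => simp

theorem head_sorted_rev {α : Type} (key : α → Int) (l : List α) :
    (PySem.List.sorted l key true).head? = PySem.List.max? l key := by
  show (List.foldl (fun a x =>
      PySem.List.insertBy (fun a b => decide (key b < key a)) x a) [] l).head? = _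
  rw [head_foldl_insertBy]
  rfl

theorem max?_map_aux {α β : Type} (g : α → β) (key : β → Int) :
    ∀ (l : List α) (o : Option α),
    List.foldl (fun acc x =>
        match acc with
        | none => some (g x)
        | some m => if key m < key (g x) then some (g x) else some m) (Option.map g o) l
      = Option.map g (List.foldl (fun acc x =>
        match acc with
        | none => some x
        | some m => if key (g m) < key (g x) then some x else some m) o l) := by
  intro l
  induction l with
  | nil => intro o; rfl
  | cons x t ih =>
    intro o
    simp only [List.foldl_cons]
    have hstep : (match Option.map g o with
        | none => some (g x)
        | some m => if key m < key (g x) then some (g x) else some m)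
      = Option.map g (match o with
        | none => some x
        | some m => if key (g m) < key (g x) then some x else some m) := by
      cases o with
      | none => rfl
      | some m => simp only [Option.map_some]; split <;> rfl
    rw [hstep]
    cases ho : (match o with
        | none => some x
        | some m => if key (g m) < key (g x) then some x else some m) with
    | none => exact ih none
    | some m => exact ih (some m)

theorem max?_map {α β : Type} (g : α → β) (key : β → Int) (l : List α) :
    PySem.List.max? (l.map g) key = (PySem.List.max? l (fun x => key (g x))).map g := by
  simp only [PySem.List.max?, List.foldl_map]
  exact max?_map_aux g key l none

theorem amax_fold_spec {α : Type} (f : α → Int) : ∀ (l : List α) (m r : α),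
    l.foldl (amaxStep f) m = r →
    (∀ y ∈ l, f y ≤ f r) ∧
    f m ≤ f r ∧
    (r = m ∨ ∃ p q, l = p ++ r :: q ∧ (∀ y ∈ p, f y < f r) ∧ f m < f r) := by
  intro l
  induction l with
  | nil =>
    intro m r hr
    obtain rfl : m = r := hr
    exact ⟨by simp, le_refl _, Or.inl rfl⟩
  | cons x t ih =>
    intro m r hr
    simp only [List.foldl_cons, amaxStep] at hr
    by_cases h : f m < f x
    · rw [if_pos h] at hr
      obtain ⟨hall, hseed, hstruct⟩ := ih x r hr
      refine ⟨?_, le_of_lt (lt_of_lt_of_le h hseed), ?_⟩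
      · intro y hy
        rcases List.mem_cons.mp hy with rfl | hy
        · exact hseed
        · exact hall y hy
      · rcases hstruct with rfl | ⟨p, q, hpq, hp, hx⟩
        · exact Or.inr ⟨[], t, rfl, by simp, h⟩
        · refine Or.inr ⟨x :: p, q, by rw [hpq]; rfl, ?_, lt_of_lt_of_le h hseed⟩
          intro y hy
          rcases List.mem_cons.mp hy with rfl | hy
          · exact hx
          · exact hp y hy
    · rw [if_neg h] at hr
      obtain ⟨hall, hseed, hstruct⟩ := ih m r hr
      push Not at h
      refine ⟨?_, hseed, ?_⟩
      · intro y hy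
        rcases List.mem_cons.mp hy with rfl | hy
        · exact le_trans h hseed
        · exact hall y hy
      · rcases hstruct with rfl | ⟨p, q, hpq, hp, hm⟩
        · exact Or.inl rfl
        · refine Or.inr ⟨x :: p, q, by rw [hpq]; rfl, ?_, hm⟩
          intro y hy
          rcases List.mem_cons.mp hy with rfl | hy
          · exact lt_of_le_of_lt h hm
          · exact hp y hy

theorem max?_some_foldl' {α : Type} (f : α → Int) : ∀ (t : List α) (m : α),
    t.foldl (fun acc x =>
      match acc with
      | none => some x
      | some m => if f m < f x then some x else some m) (some m)
    = some (t.foldl (amaxStep f) m) := by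
  intro t
  induction t with
  | nil => intro m; rfl
  | cons x t ih =>
    intro m
    simp only [List.foldl_cons, amaxStep]
    by_cases h : f m < f x
    · simp [h, ih]
    · simp [h, ih]

theorem max?_first {α : Type} (f : α → Int) (l : List α) (r : α)
    (h : PySem.List.max? l f = some r) :
    (∀ y ∈ l, f y ≤ f r) ∧ l.find? (fun y => decide (f r ≤ f y)) = some r := by
  cases l with
  | nil => simp [PySem.List.max?] at h
  | cons x t =>
    rw [show PySem.List.max? (x :: t) f = some (t.foldl (amaxStep f) x) from by
      simp only [PySem.List.max?, List.foldl_cons]; exact max?_some_foldl' f t x] at h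
    have hr : t.foldl (amaxStep f) x = r := by injection h
    obtain ⟨hall, hseed, hstruct⟩ := amax_fold_spec f t x r hr
    constructor
    · intro y hy
      rcases List.mem_cons.mp hy with rfl | hy
      · exact hseed
      · exact hall y hy
    · rcases hstruct with rfl | ⟨p, q, hpq, hp, hx⟩
      · rw [List.find?_cons]
        simp
      · rw [hpq, show x :: (p ++ r :: q) = (x :: p) ++ r :: q from rfl,
          List.find?_append]
        have hnone : (x :: p).find? (fun y => decide (f r ≤ f y)) = none := by
          rw [List.find?_eq_none]
          intro y hy
          rcases List.mem_cons.mp hy with rfl | hy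
          · simpa using hx
          · simpa using hp y hy
        rw [hnone, List.find?_cons]
        simp


theorem find?_foldl_add {α : Type} [BEq α] [LawfulBEq α] (p : α → Bool) :
    ∀ (l : List α) (s : PySem.Set α),
      (List.foldl PySem.Set.add s l).find? p = (s.find? p).or (l.find? p) := by
  intro l
  induction l with
  | nil => intro s; simp
  | cons x t ih =>
    intro s
    simp only [List.foldl_cons]
    rw [ih]
    by_cases hc : x ∈ s
    · rw [show PySem.Set.add s x = s from by simp [PySem.Set.add, hc]]
      rw [List.find?_cons]
      cases hp : p x with
      | false => rfl
      | true =>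
        have hsome : (s.find? p).isSome := by
          rw [List.find?_isSome]
          exact ⟨x, hc, hp⟩
        obtain ⟨v, hv⟩ := Option.isSome_iff_exists.mp hsome
        rw [hv]
        rfl
    · rw [show PySem.Set.add s x = s ++ [x] from by simp [PySem.Set.add, hc]]
      rw [List.find?_append, Option.or_assoc, List.find?_cons]
      cases hp : p x <;> simp [hp]

theorem find?_ofList {α : Type} [BEq α] [LawfulBEq α] (p : α → Bool) (l : List α) :
    (PySem.Set.ofList l).find? p = l.find? p := by
  rw [PySem.Set.ofList, find?_foldl_add]
  rfl

theorem class_vote_eq_counter (xs : List Int) :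
    xs.foldl (fun d neighbor =>
        if d.contains neighbor then d.insert neighbor (d.getD neighbor 0 + 1)
        else d.insert neighbor 1) (PySem.Dict.empty : PySem.Dict Int Int)
      = PySem.Dict.counter xs := by
  rw [← PySem.Dict.foldl_insert_getD_add_one_eq_counter]
  have h : (fun (d : PySem.Dict Int Int) neighbor =>
      if d.contains neighbor then d.insert neighbor (d.getD neighbor 0 + 1)
      else d.insert neighbor 1)
    = fun d x => d.insert x (d.getD x 0 + 1) := by
    funext d n
    by_cases hc : d.contains n
    · rw [if_pos hc]
    · rw [if_neg hc, PySem.Dict.getD_of_not_contains d 0 (by simpa using hc)]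
      norm_num
  rw [h]

-- ===== VERDICT (by name: the statement is the Claim_ definition above) =====
theorem get_majority_class_spec : Claim_equal_get_majority_class := by
  intro neighbors hdom hpre
  unfold Spec_get_majority_class
  cases neighbors with
  | nil => exact absurd rfl hpre
  | cons x t =>
    -- abbreviations
    set xs : List Int := x :: t with hxs
    set f : Int → Int := fun n => ((List.count n xs : Nat) : Int) with hf
    set g : Int → Int × Int := fun k => (k, ((List.count k xs : Nat) : Int)) with hg
    -- B's value
    have hB : get_majority_class_alt xs = t.foldl (amaxStep f) x := by
      show (List.foldl _ (x, ((List.count x xs : Nat) : Int)) xs).1 = _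
      rw [b_fold_proj xs xs x, hxs]
      rw [← hxs]
      conv_lhs => rw [hxs]
      rw [List.foldl_cons]
      simp only [amaxStep, ite_self]
      simp only [← hxs]
      rfl
    have hmaxB : PySem.List.max? xs f = some (t.foldl (amaxStep f) x) := max?_cons f x t
    -- A's value
    have hitems : (xs.foldl (fun d neighbor =>
        if d.contains neighbor then d.insert neighbor (d.getD neighbor 0 + 1)
        else d.insert neighbor 1) (PySem.Dict.empty : PySem.Dict Int Int)).items
        = (PySem.Set.ofList xs).map g := by
      rw [class_vote_eq_counter, PySem.Dict.items_counter]
    have hne : ((PySem.Set.ofList xs).map g) ≠ [] := by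
      intro hnil
      have hx : x ∈ PySem.Set.ofList xs := (PySem.Set.mem_ofList xs x).mpr (by simp [hxs])
      have : g x ∈ (PySem.Set.ofList xs).map g := List.mem_map_of_mem hx
      rw [hnil] at this
      exact absurd this (List.not_mem_nil)
    have hsne : PySem.List.sorted ((PySem.Set.ofList xs).map g) (fun p => p.2) true ≠ [] := by
      intro hnil
      exact hne ((PySem.List.sorted_eq_nil_iff _ _ _).mp hnil)
    obtain ⟨m, rest, hsv⟩ : ∃ m rest,
        PySem.List.sorted ((PySem.Set.ofList xs).map g) (fun p => p.2) true = m :: rest := by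
      cases hs : PySem.List.sorted ((PySem.Set.ofList xs).map g) (fun p => p.2) true with
      | nil => exact absurd hs hsne
      | cons m rest => exact ⟨m, rest, rfl⟩
    have hA : get_majority_class xs = m.1 := by
      show ((PySem.List.pyGet? (PySem.List.sorted
          (xs.foldl (fun d neighbor =>
            if d.contains neighbor then d.insert neighbor (d.getD neighbor 0 + 1)
            else d.insert neighbor 1) (PySem.Dict.empty : PySem.Dict Int Int)).items (fun p => p.2) true) 0).getD (0, 0)).1 = m.1
      rw [hitems, hsv]
      simp [PySem.List.pyGet?, PySem.List.pyIdx?]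
    -- the head of the sorted items is the first maximal item
    have hhead : PySem.List.max? ((PySem.Set.ofList xs).map g) (fun p => p.2) = some m := by
      rw [← head_sorted_rev, hsv]
      rfl
    have hmapped : (PySem.List.max? (PySem.Set.ofList xs) f).map g = some m := by
      rw [← hhead, max?_map g (fun p => p.2) (PySem.Set.ofList xs)]
    obtain ⟨rA, hrA, hgm⟩ : ∃ rA, PySem.List.max? (PySem.Set.ofList xs) f = some rA ∧ g rA = m := by
      cases hq : PySem.List.max? (PySem.Set.ofList xs) f with
      | none => rw [hq] at hmapped; exact absurd hmapped (by simp)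
      | some rA =>
        rw [hq] at hmapped
        exact ⟨rA, rfl, by injection hmapped⟩
    -- both are the first element of xs attaining the maximal count
    obtain ⟨hboundA, hfindA⟩ := max?_first f (PySem.Set.ofList xs) rA hrA
    obtain ⟨hboundB, hfindB⟩ := max?_first f xs _ hmaxB
    set rB : Int := t.foldl (amaxStep f) x with hrB
    rw [find?_ofList] at hfindA
    have hmemA : rA ∈ xs := List.mem_of_find?_eq_some hfindA
    have hmemB : rB ∈ xs := List.mem_of_find?_eq_some hfindB
    have hfab : f rA = f rB :=
      le_antisymm (hboundB rA hmemA) (hboundA rB ((PySem.Set.mem_ofList xs rB).mpr hmemB))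
    have : some rA = some rB := by
      rw [← hfindA, ← hfindB, hfab]
    have hr : rA = rB := by injection this
    rw [hA, hB, ← hgm, hg, hr]
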